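-- pv_equiv track=rewrite | github.com/sand-bar/SAND-Trail-Search | ciphers/SatConstraints.py | ListAssert
-- ===== SOURCE A (Python) =====
-- def XorTwoAssert(x0, x1):
--     return "BVXOR({}, {})".format(x0, x1)
--
-- def ListAssert(k_list):
--     L = len(k_list)
--     assert L >= 2
--     if L == 2:
--         return "ASSERT({} = {});\n".format(k_list[0], k_list[1])
--     xor_before = k_list[L - 1]
--     for i in range(L - 2):
--         xor_current = XorTwoAssert(k_list[L - 1 - 1 - i], xor_before)
--         xor_before = xor_current
--     return "ASSERT({} = {});\n".format(k_list[0], xor_current)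
-- ===== SOURCE B (Python) =====
-- def ListAssert(k_list):
--     L = len(k_list)
--     assert L >= 2
--     opens = "".join("BVXOR({}, ".format(x) for x in k_list[1:L - 1])
--     expr = opens + k_list[L - 1] + ")" * (L - 2)
--     return "ASSERT({} = {});\n".format(k_list[0], expr)
-- ===== Notes on version B (the rewrite author's own statement) =====
-- stated objective: simpler
-- what changed: B replaces A's inner-to-outer fold (repeatedly wrapping a growing accumulator in BVXOR from the last element backwards) with a single forward pass: it joins the opening fragments 'BVXOR(x, ' for the middle elements, appends the last element, and closes with a counted run of ')'; the L==2 case falls out of the same formula instead of a separate branch.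
import Mathlib
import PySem

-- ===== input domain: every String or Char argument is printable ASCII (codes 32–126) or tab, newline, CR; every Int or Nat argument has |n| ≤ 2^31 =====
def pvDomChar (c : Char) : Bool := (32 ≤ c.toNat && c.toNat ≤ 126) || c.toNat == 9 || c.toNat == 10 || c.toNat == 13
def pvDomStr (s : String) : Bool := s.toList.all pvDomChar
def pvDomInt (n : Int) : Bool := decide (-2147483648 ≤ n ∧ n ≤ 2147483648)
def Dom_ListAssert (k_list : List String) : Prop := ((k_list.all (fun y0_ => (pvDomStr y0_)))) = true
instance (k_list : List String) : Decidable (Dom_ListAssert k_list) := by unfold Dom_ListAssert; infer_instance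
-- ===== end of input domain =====

-- B builds the nested-XOR string in one forward pass (joined opening fragments, innermost term, closing parens) instead of A's inner-to-outer fold; objective: simpler.

-- ===== PORT A =====
def XorTwoAssert (x0 x1 : String) : String :=
  "BVXOR(" ++ x0 ++ ", " ++ x1 ++ ")"

def ListAssert (k_list : List String) : String :=
  let L : Int := k_list.length
  if L = 2 then
    "ASSERT(" ++ (PySem.List.pyGet? k_list 0).getD "" ++ " = " ++ (PySem.List.pyGet? k_list 1).getD "" ++ ");\n"
  else
    let xor_current :=
      (PySem.List.pyRange 0 (L - 2) 1).foldl
        (fun xor_before i =>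
          XorTwoAssert ((PySem.List.pyGet? k_list (L - 1 - 1 - i)).getD "") xor_before)
        ((PySem.List.pyGet? k_list (L - 1)).getD "")
    "ASSERT(" ++ (PySem.List.pyGet? k_list 0).getD "" ++ " = " ++ xor_current ++ ");\n"

-- ===== PORT B =====
-- ")" * (L - 2) is ported as String.ofList (List.replicate (L-2).toNat ')'): exact, since Python
-- string repetition yields "" for a non-positive count, as does .toNat there.
def ListAssert_alt (k_list : List String) : String :=
  let L : Int := k_list.length
  let opens := PySem.Str.join ""
    ((PySem.List.slice k_list (some 1) (some (L - 1))).map (fun x => "BVXOR(" ++ x ++ ", "))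
  let expr := opens ++ (PySem.List.pyGet? k_list (L - 1)).getD ""
      ++ String.ofList (List.replicate (L - 2).toNat ')')
  "ASSERT(" ++ (PySem.List.pyGet? k_list 0).getD "" ++ " = " ++ expr ++ ");\n"

-- ===== PRECONDITION & SPEC =====
-- A's `assert L >= 2` raises AssertionError on lists shorter than 2; Pre_ excludes exactly those.
def Pre_ListAssert (k_list : List String) : Prop := 2 ≤ k_list.length
instance (k_list : List String) : Decidable (Pre_ListAssert k_list) := by unfold Pre_ListAssert; infer_instance
def pvWitness_ListAssert : List String := ["k1", "k2", "k3"]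

def Spec_ListAssert (k_list : List String) (out : String) : Prop := out = ListAssert_alt k_list
instance (k_list : List String) (out : String) : Decidable (Spec_ListAssert k_list out) := by unfold Spec_ListAssert; infer_instance

-- ===== CLAIM (what is proved, stated in full; the proofs are below) =====
def Claim_equal_ListAssert : Prop := ∀ (k_list : List String), Dom_ListAssert k_list → Pre_ListAssert k_list → Spec_ListAssert k_list (ListAssert k_list)

-- ===== LEMMAS AND PROOFS =====

-- The nested XOR expression over a nonempty list of operands (reference shape both ports reach).
def nestXor : List String → String
  | [] => ""
  | [x] => x
  | x :: y :: ys => "BVXOR(" ++ x ++ ", " ++ nestXor (y :: ys) ++ ")"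

theorem nestXor_cons (x : String) (xs : List String) (h : xs ≠ []) :
    nestXor (x :: xs) = "BVXOR(" ++ x ++ ", " ++ nestXor xs ++ ")" := by
  cases xs with
  | nil => exact absurd rfl h
  | cons y ys => rfl
theorem foldA (rest : List String) (h : rest ≠ []) :
    (List.range (rest.length - 1)).foldl
      (fun xb k => XorTwoAssert (rest.getD (rest.length - 2 - k) "") xb)
      (rest.getD (rest.length - 1) "") = nestXor rest := by
  induction rest with
  | nil => exact absurd rfl h
  | cons x xs ih =>
    cases xs with
    | nil => simp [nestXor]
    | cons y ys =>
      have hxs : (y :: ys) ≠ [] := by simp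
      have hn : (x :: y :: ys).length - 1 = ys.length + 1 := by simp
      rw [hn, List.range_succ, List.foldl_append]
      have hinner :
          (List.range ys.length).foldl
            (fun xb k => XorTwoAssert ((x :: y :: ys).getD ((x :: y :: ys).length - 2 - k) "") xb)
            ((x :: y :: ys).getD (ys.length + 1) "")
          = nestXor (y :: ys) := by
        rw [← ih hxs]
        have hinit : (x :: y :: ys).getD (ys.length + 1) ""
            = (y :: ys).getD ((y :: ys).length - 1) "" := by
          simp
          rfl
        rw [hinit]
        apply PySem.List.foldl_congr_mem
        intro acc k hk
        have hk' : k < ys.length := List.mem_range.mp hk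
        have h1 : (x :: y :: ys).length - 2 - k = ((y :: ys).length - 2 - k) + 1 := by
          simp; omega
        rw [h1, List.getD_cons_succ]
      rw [hinner]
      have h0 : (x :: y :: ys).length - 2 - ys.length = 0 := by simp
      simp only [List.foldl_cons, List.foldl_nil, h0, List.getD_cons_zero]
      rw [nestXor_cons x (y :: ys) hxs]
      rfl
theorem str_join_empty_cons (p : String) (ps : List String) :
    PySem.Str.join "" (p :: ps) = p ++ PySem.Str.join "" ps := by
  apply String.toList_inj.mp
  cases ps <;>
    simp [PySem.Chars.join_cons_cons, PySem.Chars.join_singleton, PySem.Chars.join_nil]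
theorem foldB (rest : List String) (h : rest ≠ []) :
    PySem.Str.join "" (rest.dropLast.map (fun x => "BVXOR(" ++ x ++ ", "))
      ++ rest.getD (rest.length - 1) ""
      ++ String.ofList (List.replicate (rest.length - 1) ')') = nestXor rest := by
  induction rest with
  | nil => exact absurd rfl h
  | cons x xs ih =>
    cases xs with
    | nil =>
      apply String.toList_inj.mp
      simp [nestXor, PySem.Chars.join_nil]
    | cons y ys =>
      have hxs : (y :: ys) ≠ [] := by simp
      have ih' := ih hxs
      have hdl : (x :: y :: ys).dropLast = x :: (y :: ys).dropLast := List.dropLast_cons₂ ..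
      have hlast : (x :: y :: ys).getD ((x :: y :: ys).length - 1) ""
          = (y :: ys).getD ((y :: ys).length - 1) "" := by
        simp
        rfl
      have hrep : List.replicate ((x :: y :: ys).length - 1) ')'
          = List.replicate ((y :: ys).length - 1) ')' ++ [')'] := by
        simp [← List.replicate_succ']
      rw [hdl, List.map_cons, str_join_empty_cons, hlast, hrep, String.ofList_append]
      apply String.toList_inj.mp
      have ihl := congrArg String.toList ih'
      simp only [String.toList_append, List.append_assoc] at ihl
      simp only [nestXor, String.toList_append, String.toList_ofList, List.append_assoc]
      rw [← ihl]
      simp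
theorem getlast_shift (k0 : String) (rest : List String) (h : rest ≠ []) :
    (PySem.List.pyGet? (k0 :: rest) ((((k0 :: rest).length : Nat) : Int) - 1)).getD ""
      = rest.getD (rest.length - 1) "" := by
  obtain ⟨m, hm⟩ : ∃ m, rest.length = m + 1 := ⟨rest.length - 1, by
    have := List.length_pos_of_ne_nil h; omega⟩
  have h1 : (((k0 :: rest).length : Nat) : Int) - 1 = ((rest.length : Nat) : Int) := by
    simp
  rw [h1, PySem.List.pyGet?_natCast, hm]
  simp [List.getD]

theorem get0 (k0 : String) (rest : List String) :
    (PySem.List.pyGet? (k0 :: rest) 0).getD "" = k0 := by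
  rw [show (0 : Int) = ((0 : Nat) : Int) from rfl, PySem.List.pyGet?_natCast]
  simp

theorem aEq (k0 : String) (rest : List String) (h : rest ≠ []) :
    ListAssert (k0 :: rest) = "ASSERT(" ++ k0 ++ " = " ++ nestXor rest ++ ");\n" := by
  match rest, h with
  | [k1], _ =>
    show ListAssert [k0, k1] = _
    unfold ListAssert
    norm_num [nestXor, get0 k0 [k1]]
  | r1 :: r2 :: rs, _ =>
    have h2 : 2 ≤ (r1 :: r2 :: rs).length := by simp
    set rest := r1 :: r2 :: rs with hrest
    have hne : rest ≠ [] := by simp [hrest]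
    unfold ListAssert
    have hL2 : (((k0 :: rest).length : Nat) : Int) ≠ 2 := by
      simp only [List.length_cons]
      push_cast
      omega
    rw [if_neg hL2]
    have hr : (((k0 :: rest).length : Nat) : Int) - 2 = ((rest.length - 1 : Nat) : Int) := by
      simp only [List.length_cons]
      omega
    rw [hr, PySem.List.pyRange_zero_nat, List.foldl_map, get0, getlast_shift k0 rest hne]
    have hfold :
        (List.range (rest.length - 1)).foldl
          (fun (xor_before : String) (k : Nat) =>
            XorTwoAssert
              ((PySem.List.pyGet? (k0 :: rest)
                  ((((k0 :: rest).length : Nat) : Int) - 1 - 1 - ((k : Nat) : Int))).getD "")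
              xor_before)
          (rest.getD (rest.length - 1) "")
        = (List.range (rest.length - 1)).foldl
          (fun xb k => XorTwoAssert (rest.getD (rest.length - 2 - k) "") xb)
          (rest.getD (rest.length - 1) "") := by
      apply PySem.List.foldl_congr_mem
      intro acc k hk
      have hk' : k < rest.length - 1 := List.mem_range.mp hk
      obtain ⟨n, hn⟩ : ∃ n, rest.length - 1 - k = n + 1 := ⟨rest.length - 2 - k, by
        simp [hrest] at hk' ⊢; omega⟩
      have hi : (((k0 :: rest).length : Nat) : Int) - 1 - 1 - (k : Int)
          = ((rest.length - 1 - k : Nat) : Int) := by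
        simp only [List.length_cons]
        omega
      rw [hi, PySem.List.pyGet?_natCast, hn]
      have hn2 : rest.length - 2 - k = n := by
        simp [hrest] at hk' hn ⊢; omega
      simp [List.getD, hn2]
    rw [hfold, foldA rest hne]

theorem altEq (k0 : String) (rest : List String) (h : rest ≠ []) :
    ListAssert_alt (k0 :: rest) = "ASSERT(" ++ k0 ++ " = " ++ nestXor rest ++ ");\n" := by
  unfold ListAssert_alt
  dsimp only
  have hsl : PySem.List.slice (k0 :: rest) (some 1)
      (some ((((k0 :: rest).length : Nat) : Int) - 1)) = rest.dropLast := by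
    have h1 : ((((k0 :: rest).length : Nat)) : Int) - 1 = ((rest.length : Nat) : Int) := by simp
    rw [h1, show (1 : Int) = ((1 : Nat) : Int) from rfl, PySem.List.slice_natCast]
    simp [List.dropLast_eq_take]
  have hrep : ((((k0 :: rest).length : Nat) : Int) - 2).toNat = rest.length - 1 := by
    simp only [List.length_cons]
    omega
  rw [hsl, hrep, get0, getlast_shift k0 rest h, foldB rest h]

-- ===== VERDICT (by name: the statement is the Claim_ definition above) =====
theorem ListAssert_spec : Claim_equal_ListAssert := by
  intro k_list _ hpre
  unfold Spec_ListAssert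
  match k_list, hpre with
  | k0 :: rest, hpre =>
    have h : rest ≠ [] := by
      intro hnil
      simp [Pre_ListAssert, hnil] at hpre
    rw [aEq k0 rest h, altEq k0 rest h]
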